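-- pv_equiv track=rewrite | github.com/BAC-bac/Hurrican-Analysis-Project | Hurricane.Code.py | most_affected_areas
-- ===== SOURCE A (Python) =====
-- def most_affected_areas(count_affected):
--   most_affected = {}
--   count = 0
--   for key, value in count_affected.items():
--     if value > count:
--       most_affected[key] = value
--       count = value
--   return most_affected
-- ===== SOURCE B (Python) =====
-- def most_affected_areas(count_affected):
--     items = list(count_affected.items())
--     prefix = [0]
--     for _, v in items:
--         prefix.append(max(prefix[-1], v))
--     return {k: v for (k, v), m in zip(items, prefix) if v > m}
-- ===== Notes on version B (the rewrite author's own statement) =====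
-- stated objective: alternative
-- what changed: Replaces the single stateful scan (dict + running count updated in the loop) by a two-phase decomposition: first build a prefix-maxima table seeded with 0, then filter the items against it with a comprehension.
import Mathlib
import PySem

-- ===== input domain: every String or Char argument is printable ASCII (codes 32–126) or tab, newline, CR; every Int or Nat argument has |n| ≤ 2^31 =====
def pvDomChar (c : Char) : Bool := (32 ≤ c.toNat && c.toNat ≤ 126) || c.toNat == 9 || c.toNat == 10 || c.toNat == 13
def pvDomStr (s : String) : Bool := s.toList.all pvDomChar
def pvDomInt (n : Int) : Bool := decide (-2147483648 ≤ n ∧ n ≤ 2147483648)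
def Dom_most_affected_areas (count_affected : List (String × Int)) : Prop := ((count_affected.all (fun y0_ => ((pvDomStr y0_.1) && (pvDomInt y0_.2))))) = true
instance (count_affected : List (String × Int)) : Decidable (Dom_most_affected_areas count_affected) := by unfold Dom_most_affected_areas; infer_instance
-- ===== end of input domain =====

-- B replaces A's single stateful scan by "build a prefix-maxima table, then filter against it" (objective: alternative decomposition, same cost).

-- ===== PORT A =====
-- state = (most_affected dict, count); one pass, keep value iff value > count, then count := value
def most_affected_areas (count_affected : List (String × Int)) : List (String × Int) :=
  (count_affected.foldl
    (fun (st : PySem.Dict String Int × Int) kv =>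
      if st.2 < kv.2 then (st.1.insert kv.1 kv.2, kv.2) else st)
    ((PySem.Dict.empty : PySem.Dict String Int), (0 : Int))).1.items

-- ===== PORT B =====
-- prefix-maxima table seeded with 0; prefix[-1] is exact as getLastD 0 since the list is never empty
def pvPrefixMax (count_affected : List (String × Int)) : List Int :=
  count_affected.foldl (fun p kv => p ++ [max (p.getLastD 0) kv.2]) [(0 : Int)]

def most_affected_areas_alt (count_affected : List (String × Int)) : List (String × Int) :=
  (((count_affected.zip (pvPrefixMax count_affected)).filter (fun x => x.2 < x.1.2)).foldl
    (fun (d : PySem.Dict String Int) x => d.insert x.1.1 x.1.2)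
    (PySem.Dict.empty : PySem.Dict String Int)).items

-- ===== PRECONDITION & SPEC =====
def Spec_most_affected_areas (count_affected : List (String × Int)) (out : List (String × Int)) : Prop := out = most_affected_areas_alt count_affected
instance (count_affected : List (String × Int)) (out : List (String × Int)) : Decidable (Spec_most_affected_areas count_affected out) := by unfold Spec_most_affected_areas; infer_instance

-- ===== CLAIM (what is proved, stated in full; the proofs are below) =====
def Claim_equal_most_affected_areas : Prop := ∀ (count_affected : List (String × Int)), Dom_most_affected_areas count_affected → Spec_most_affected_areas count_affected (most_affected_areas count_affected)

-- ===== LEMMAS AND PROOFS =====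

/-- Recursive characterisation of the prefix-maxima table starting at running max `c`. -/
def pvScan (c : Int) : List (String × Int) → List Int
  | [] => [c]
  | kv :: t => c :: pvScan (max c kv.2) t

theorem pv_dropLast_getLastD {p : List Int} (hp : p ≠ []) :
    p.dropLast ++ [p.getLastD 0] = p := by
  cases p with
  | nil => exact absurd rfl hp
  | cons a t =>
      simp [List.getLastD_eq_getLast?, List.getLast?_eq_some_getLast (List.cons_ne_nil a t),
        List.dropLast_append_getLast (List.cons_ne_nil a t)]

theorem pvScan_foldl (l : List (String × Int)) : ∀ (p : List Int), p ≠ [] →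
    l.foldl (fun p kv => p ++ [max (p.getLastD 0) kv.2]) p
      = p.dropLast ++ pvScan (p.getLastD 0) l := by
  induction l with
  | nil =>
      intro p hp
      simpa [pvScan] using (pv_dropLast_getLastD hp).symm
  | cons kv t ih =>
      intro p hp
      have h1 : (p ++ [max (p.getLastD 0) kv.2]).getLastD 0 = max (p.getLastD 0) kv.2 := by
        simp
      have h2 : (p ++ [max (p.getLastD 0) kv.2]).dropLast = p := by
        simp
      calc (kv :: t).foldl (fun p kv => p ++ [max (p.getLastD 0) kv.2]) p
          = t.foldl (fun p kv => p ++ [max (p.getLastD 0) kv.2]) (p ++ [max (p.getLastD 0) kv.2]) := rfl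
        _ = (p ++ [max (p.getLastD 0) kv.2]).dropLast
              ++ pvScan ((p ++ [max (p.getLastD 0) kv.2]).getLastD 0) t := ih _ (by simp)
        _ = p ++ pvScan (max (p.getLastD 0) kv.2) t := by rw [h1, h2]
        _ = p.dropLast ++ pvScan (p.getLastD 0) (kv :: t) := by
              rw [pvScan, show p.dropLast ++ p.getLastD 0 :: pvScan (max (p.getLastD 0) kv.2) t
                  = (p.dropLast ++ [p.getLastD 0]) ++ pvScan (max (p.getLastD 0) kv.2) t by simp,
                pv_dropLast_getLastD hp]

theorem pvPrefixMax_eq_scan (l : List (String × Int)) : pvPrefixMax l = pvScan 0 l := by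
  simpa [pvPrefixMax] using pvScan_foldl l [(0 : Int)] (by simp)

theorem pv_main (l : List (String × Int)) : ∀ (d : PySem.Dict String Int) (c : Int),
    (l.foldl (fun (st : PySem.Dict String Int × Int) kv =>
        if st.2 < kv.2 then (st.1.insert kv.1 kv.2, kv.2) else st) (d, c)).1
      = ((l.zip (pvScan c l)).filter (fun x => x.2 < x.1.2)).foldl
          (fun (d : PySem.Dict String Int) x => d.insert x.1.1 x.1.2) d := by
  induction l with
  | nil => intro d c; simp [pvScan]
  | cons kv t ih =>
      intro d c
      by_cases h : c < kv.2
      · have hmax : max c kv.2 = kv.2 := max_eq_right (le_of_lt h)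
        simp [pvScan, h, hmax, ih]
      · have hmax : max c kv.2 = c := max_eq_left (not_lt.mp h)
        simp [pvScan, h, hmax, ih]

-- ===== VERDICT (by name: the statement is the Claim_ definition above) =====
theorem most_affected_areas_spec : Claim_equal_most_affected_areas := by
  intro ca _
  unfold Spec_most_affected_areas most_affected_areas most_affected_areas_alt
  rw [pvPrefixMax_eq_scan, pv_main]
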